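-- pv_equiv track=rewrite | github.com/kizzyterra14/EDA-2015 | Trabalho Final/Exercicios_Otto/rademaker_2_funcional.py | contagem
-- ===== SOURCE A (Python) =====
-- def compara(valor1, valor2):
--     #if valor1[0] == valor2[0] or valor1[0] == valor2[1]:
--     if valor1 == valor2:
--         return(True)
--     else:
--         return(False)
--
-- def contagem(restante, deletado):
--     repeticoes = 0
--     restante_lista = []
--     deletado_lista = []
--     #necessario transformas as listas que estavam em tuplas em apenas listas, para manter linearidade.
--     for valor_tupla in restante:
--         restante_lista.append(valor_tupla[0])
--     for valor_tupla in deletado: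
--         deletado_lista.extend([valor_tupla[0],valor_tupla[1]])
--     for valor in restante_lista:
--         cont = 0
--         if valor is None:
--             next
--         while cont != len(deletado_lista):
--             if compara(valor,deletado_lista[cont]) is True:
--                 repeticoes += 1
--                 deletado_lista.remove(deletado_lista[cont])
--                 cont -= 1
--             cont += 1
--     return(repeticoes)
-- ===== SOURCE B (Python) =====
-- def contagem(restante, deletado):
--     freq = {}
--     for t in deletado:
--         for v in (t[0], t[1]):
--             freq[v] = freq.get(v, 0) + 1
--     total = 0
--     seen = set()
--     for t in restante:
--         v = t[0]
--         if v not in seen: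
--             seen.add(v)
--             total += freq.get(v, 0)
--     return total
-- ===== Notes on version B (the rewrite author's own statement) =====
-- stated objective: faster
-- what changed: Replaces A's nested scan-and-remove over a mutable flattened list with a one-pass frequency dict of the deleted values plus a seen-set over the distinct remaining first-values, summing counts by lookup.
import Mathlib
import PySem

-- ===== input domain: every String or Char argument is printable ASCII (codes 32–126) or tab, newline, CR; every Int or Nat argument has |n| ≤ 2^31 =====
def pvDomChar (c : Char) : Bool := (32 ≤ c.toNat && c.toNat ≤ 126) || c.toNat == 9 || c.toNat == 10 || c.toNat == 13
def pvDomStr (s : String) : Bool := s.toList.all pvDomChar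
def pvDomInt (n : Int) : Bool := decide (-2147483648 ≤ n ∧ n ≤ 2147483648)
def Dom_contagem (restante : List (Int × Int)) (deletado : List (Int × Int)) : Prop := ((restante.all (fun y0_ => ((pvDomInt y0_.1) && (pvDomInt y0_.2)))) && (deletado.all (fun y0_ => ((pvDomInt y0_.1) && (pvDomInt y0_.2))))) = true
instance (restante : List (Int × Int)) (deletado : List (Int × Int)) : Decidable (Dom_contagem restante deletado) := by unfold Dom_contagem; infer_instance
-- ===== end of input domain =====

-- B replaces A's quadratic scan-and-remove over a mutable flattened list with a frequency
-- dict of the deleted values plus a seen-set over the remaining first-values (objective: faster).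

-- ===== PORT A =====
def compara (valor1 valor2 : Int) : Bool := if valor1 == valor2 then true else false

-- Python's 'while cont != len(deletado_lista)': cont only ever steps by +1 or stays while the
-- list shrinks by 1, so cont never exceeds the length; the guard is written 'cont < length'
-- (equivalent on every reachable state) to make termination structural.
def contagemWhile (valor : Int) (cont : Nat) (dl : List Int) (rep : Int) : Int × List Int :=
  if h : cont < dl.length then
    if compara valor dl[cont] then
      contagemWhile valor cont ((PySem.List.remove? dl dl[cont]).getD dl) (rep + 1)
    else
      contagemWhile valor (cont + 1) dl rep
  else (rep, dl)
termination_by dl.length - cont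
decreasing_by
  · have hm : dl[cont] ∈ dl := List.getElem_mem h
    rw [PySem.List.remove?_eq_some_erase dl dl[cont] hm]
    have := List.length_erase_of_mem hm
    simp only [Option.getD_some]
    omega
  · omega

def contagem (restante : List (Int × Int)) (deletado : List (Int × Int)) : Int :=
  let restante_lista := restante.foldl (fun acc t => acc ++ [t.1]) []
  let deletado_lista := deletado.foldl (fun acc t => acc ++ [t.1, t.2]) []
  (restante_lista.foldl (fun (st : Int × List Int) valor => contagemWhile valor 0 st.2 st.1)
    ((0 : Int), deletado_lista)).1

-- ===== PORT B =====
def contagem_alt (restante : List (Int × Int)) (deletado : List (Int × Int)) : Int :=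
  let freq : PySem.Dict Int Int :=
    deletado.foldl (fun d t => [t.1, t.2].foldl (fun d v => d.insert v (d.getD v 0 + 1)) d)
      PySem.Dict.empty
  (restante.foldl (fun (st : Int × PySem.Set Int) t =>
      if PySem.Set.contains st.2 t.1 then st
      else (st.1 + freq.getD t.1 0, PySem.Set.add st.2 t.1))
    ((0 : Int), PySem.Set.empty)).1

-- ===== PRECONDITION & SPEC =====
def Spec_contagem (restante : List (Int × Int)) (deletado : List (Int × Int)) (out : Int) : Prop := out = contagem_alt restante deletado
instance (restante : List (Int × Int)) (deletado : List (Int × Int)) (out : Int) : Decidable (Spec_contagem restante deletado out) := by unfold Spec_contagem; infer_instance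

-- ===== CLAIM (what is proved, stated in full; the proofs are below) =====
def Claim_equal_contagem : Prop := ∀ (restante : List (Int × Int)) (deletado : List (Int × Int)), Dom_contagem restante deletado → Spec_contagem restante deletado (contagem restante deletado)

-- ===== LEMMAS AND PROOFS =====

-- Characterisation of the while loop: provided nothing before index cont equals valor, it
-- counts and removes every occurrence of valor from cont on.
theorem contagemWhile_eq (valor : Int) (suf pre : List Int) (rep : Int)
    (hpre : valor ∉ pre) :
    contagemWhile valor pre.length (pre ++ suf) rep
      = (rep + (suf.count valor : Int), pre ++ suf.filter (fun x => !(x == valor))) := by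
  induction suf generalizing pre rep with
  | nil => rw [contagemWhile]; simp
  | cons x rest ih =>
    rw [contagemWhile]
    have hlt : pre.length < (pre ++ x :: rest).length := by simp
    have hget : (pre ++ x :: rest)[pre.length] = x := by
      simp [List.getElem_append_right (le_refl pre.length)]
    by_cases hx : x = valor
    · subst hx
      have hmem : x ∈ pre ++ x :: rest := by simp
      have herase : (pre ++ x :: rest).erase x = pre ++ rest := by
        rw [List.erase_append_right _ hpre, List.erase_cons_head]
      simp only [hlt, dif_pos, hget, compara, beq_self_eq_true, if_true,
        PySem.List.remove?_eq_some_erase _ _ hmem, Option.getD_some, herase]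
      rw [ih pre (rep + 1) hpre]
      simp
      ring
    · have hxb : (x == valor) = false := by simp [hx]
      have hc : compara valor x = false := by
        have : (valor == x) = false := by simp [Ne.symm hx]
        simp [compara, this]
      simp only [hlt, dif_pos, hget, hc, if_false, Bool.false_eq_true]
      have hpre' : valor ∉ pre ++ [x] := by
        simp [hpre]
        intro hvx
        exact hx hvx.symm
      rw [show pre ++ x :: rest = (pre ++ [x]) ++ rest by simp]
      rw [show pre.length + 1 = (pre ++ [x]).length by simp]
      rw [ih (pre ++ [x]) rep hpre']
      simp [List.count_cons, hxb]

theorem contagemWhile_zero (valor : Int) (dl : List Int) (rep : Int) :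
    contagemWhile valor 0 dl rep
      = (rep + (dl.count valor : Int), dl.filter (fun x => !(x == valor))) := by
  simpa using contagemWhile_eq valor dl [] rep (by simp)

-- A nested fold over sublists is the fold over the concatenation.
theorem foldl_foldl_eq_flatMap {α β γ : Type} (g : α → List β) (f : γ → β → γ)
    (l : List α) (init : γ) :
    l.foldl (fun d t => (g t).foldl f d) init = (l.flatMap g).foldl f init := by
  induction l generalizing init with
  | nil => simp
  | cons t rest ih => simp [List.flatMap_cons, List.foldl_append, ih]

-- The outer loops agree: A's state (count, remaining deleted values) is B's state
-- (count, seen set) through 'remaining = dl0 minus the seen values'.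
theorem outer_eq (dl0 : List Int) (vs : List Int) (seen : PySem.Set Int) (rep : Int) :
    (vs.foldl (fun (st : Int × List Int) valor =>
        (st.1 + (st.2.count valor : Int), st.2.filter (fun x => !(x == valor))))
      (rep, dl0.filter (fun x => !(PySem.Set.contains seen x)))).1
    = (vs.foldl (fun (st : Int × PySem.Set Int) v =>
          if PySem.Set.contains st.2 v then st
          else (st.1 + (dl0.count v : Int), PySem.Set.add st.2 v)) (rep, seen)).1 := by
  induction vs generalizing seen rep with
  | nil => simp
  | cons v rest ih =>
    simp only [List.foldl_cons]
    by_cases hv : PySem.Set.contains seen v = true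
    · have hv' : v ∈ seen := by simpa [PySem.Set.contains] using hv
      have hcnt : (dl0.filter (fun x => !(PySem.Set.contains seen x))).count v = 0 := by
        rw [List.count_eq_zero]
        intro hmem
        have h2 := List.of_mem_filter hmem
        rw [hv] at h2
        simp at h2
      have hfil : (dl0.filter (fun x => !(PySem.Set.contains seen x))).filter
          (fun x => !(x == v)) = dl0.filter (fun x => !(PySem.Set.contains seen x)) := by
        rw [List.filter_filter]
        apply List.filter_congr
        intro x hx
        by_cases hxv : x = v
        · subst hxv; simp [hv']
        · simp [hxv]
      rw [hcnt, hfil, if_pos hv]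
      simpa using ih seen rep
    · rw [Bool.not_eq_true] at hv
      have hv' : v ∉ seen := by simpa [PySem.Set.contains] using hv
      have hadd : PySem.Set.add seen v = seen ++ [v] := by
        simp [PySem.Set.add, hv']
      have hcnt : (dl0.filter (fun x => !(PySem.Set.contains seen x))).count v
          = dl0.count v := by
        apply List.count_filter
        simp [PySem.Set.contains, hv']
      have hfil : (dl0.filter (fun x => !(PySem.Set.contains seen x))).filter
          (fun x => !(x == v))
          = dl0.filter (fun x => !(PySem.Set.contains (PySem.Set.add seen v) x)) := by
        rw [List.filter_filter, hadd]
        apply List.filter_congr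
        intro x hx
        by_cases hxv : x = v
        · subst hxv; simp [hv', PySem.Set.contains]
        · simp [hxv, PySem.Set.contains]
      rw [if_neg (by rw [hv]; simp), hcnt, hfil]
      exact ih (PySem.Set.add seen v) (rep + (dl0.count v : Int))

-- ===== VERDICT (by name: the statement is the Claim_ definition above) =====
theorem contagem_spec : Claim_equal_contagem := by
  intro restante deletado _
  unfold Spec_contagem contagem contagem_alt
  simp only [PySem.List.foldl_append_singleton_eq_map, PySem.List.foldl_append_eq_flatMap,
    List.nil_append]
  have hfreq : ∀ v : Int,
      (deletado.foldl (fun d t => [t.1, t.2].foldl (fun d v => d.insert v (d.getD v 0 + 1)) d)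
        PySem.Dict.empty).getD v 0
      = ((deletado.flatMap (fun t => [t.1, t.2])).count v : Int) := by
    intro v
    rw [foldl_foldl_eq_flatMap (fun t => [t.1, t.2])
      (fun d v => PySem.Dict.insert d v (d.getD v 0 + 1)) deletado PySem.Dict.empty]
    rw [PySem.Dict.getD_foldl_insert_add_one]
    simp [PySem.Dict.getD, PySem.Dict.get?, PySem.Dict.empty]
  have hB : restante.foldl (fun (st : Int × PySem.Set Int) t =>
        if PySem.Set.contains st.2 t.1 then st
        else (st.1 + (deletado.foldl (fun d t => [t.1, t.2].foldl
            (fun d v => d.insert v (d.getD v 0 + 1)) d) PySem.Dict.empty).getD t.1 0,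
          PySem.Set.add st.2 t.1)) ((0 : Int), PySem.Set.empty)
      = (restante.map Prod.fst).foldl (fun (st : Int × PySem.Set Int) v =>
          if PySem.Set.contains st.2 v then st
          else (st.1 + ((deletado.flatMap (fun t => [t.1, t.2])).count v : Int),
            PySem.Set.add st.2 v)) ((0 : Int), PySem.Set.empty) := by
    rw [List.foldl_map]
    apply PySem.List.foldl_congr_mem
    intro st t _
    rw [hfreq]
  rw [hB]
  simp only [contagemWhile_zero]
  have hstart : deletado.flatMap (fun t => [t.1, t.2])
      = (deletado.flatMap (fun t => [t.1, t.2])).filter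
          (fun x => !(PySem.Set.contains PySem.Set.empty x)) := by
    simp [PySem.Set.empty, PySem.Set.contains]
  conv_lhs => rw [hstart]
  exact outer_eq (deletado.flatMap (fun t => [t.1, t.2])) (restante.map Prod.fst)
    PySem.Set.empty 0
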